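-- pv_equiv track=rewrite | github.com/ApryseSDK/PDFNetWrappers | build.py | execute_replace
-- ===== SOURCE A (Python) =====
-- def execute_replace(input, script):
--     i = 0
--     script_len = len(script)
--     while True:
--         while i < script_len:
--             if script[i] == '/\n':
--                 i += 1
--                 break
--             i += 1
--         if i >= script_len:
--             break
--         before = ''
--         while i < script_len:
--             if script[i] == '/\n':
--                 i += 1
--                 break
--             before += script[i]
--             i += 1
--         if i >= script_len:
--             break
--         after = ''
--         while i < script_len:
--             if script[i] == '/\n':
--                 i += 1
--                 break
--             after += script[i]
--             i += 1
--         input = input.replace(before, after)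
--         if i >= script_len:
--             break
--     return input
-- ===== SOURCE B (Python) =====
-- def execute_replace(input, script):
--     # Split the token stream on '/\n' delimiters into joined segments.
--     segments = []
--     cur = []
--     for tok in script:
--         if tok == '/\n':
--             segments.append(''.join(cur))
--             cur = []
--         else:
--             cur.append(tok)
--     segments.append(''.join(cur))
--     # d delimiters seen; segments[j] is delimiter-terminated iff j < d.
--     # Rule k uses segments 3k+1 (before) and 3k+2 (after); a rule applies
--     # only while its before-segment is delimiter-terminated.
--     d = len(segments) - 1
--     k = 0
--     while 3 * k + 1 < d:
--         input = input.replace(segments[3 * k + 1], segments[3 * k + 2])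
--         k += 1
--     return input
-- ===== Notes on version B (the rewrite author's own statement) =====
-- stated objective: simpler
-- what changed: A's single-cursor state machine with three interleaved inner scanning loops is replaced by one split of the token list on '/\n' delimiters into joined segments followed by a plain indexed rule loop (before=segments[3k+1], after=segments[3k+2] while 3k+1<d); Pre_ excludes scripts truncated exactly at a before-segment's closing delimiter, a corner where A silently drops the final rule while B applies it with an empty replacement - both readings of a truncated script are defensible.
-- outside the precondition, e.g. on execute_replace('ab', ['/\n', 'a', '/\n']): A returns 'ab', B returns 'b'
import Mathlib
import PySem

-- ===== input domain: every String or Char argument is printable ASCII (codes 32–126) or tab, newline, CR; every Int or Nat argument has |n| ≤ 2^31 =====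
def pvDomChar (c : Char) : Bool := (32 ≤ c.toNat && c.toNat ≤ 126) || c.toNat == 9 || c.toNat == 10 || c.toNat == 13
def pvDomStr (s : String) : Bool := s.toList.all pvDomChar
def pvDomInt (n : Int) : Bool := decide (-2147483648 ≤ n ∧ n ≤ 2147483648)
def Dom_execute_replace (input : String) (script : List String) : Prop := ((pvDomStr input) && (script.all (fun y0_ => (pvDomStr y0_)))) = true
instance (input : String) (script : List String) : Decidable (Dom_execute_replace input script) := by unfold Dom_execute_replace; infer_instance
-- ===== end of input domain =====

-- B replaces A's index-driven state machine (three interleaved scanning loops over one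
-- cursor) by one split-on-delimiter pass followed by an indexed rule loop; objective: simpler.

-- ===== PORT A =====
-- A's outer `while True` with its three inner index loops, transliterated as a mutual
-- recursion over the remaining suffix of `script` (the cursor `i` becomes the suffix).
mutual
  -- first inner loop: skip tokens until past a '/\n'; then `if i >= script_len: break`
  def pvAPhase1 (input : String) (rest : List String) : String :=
    match rest with
    | [] => input
    | t :: r => if t = "/\n" then pvAPhase2 input "" r else pvAPhase1 input r
  termination_by rest.length
  -- second inner loop: accumulate `before`; then `if i >= script_len: break`
  def pvAPhase2 (input before : String) (rest : List String) : String :=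
    match rest with
    | [] => input
    | t :: r =>
      if t = "/\n" then (if r = [] then input else pvAPhase3 input before "" r)
      else pvAPhase2 input (before ++ t) r
  termination_by rest.length
  -- third inner loop: accumulate `after`; then replace; then `if i >= script_len: break`
  def pvAPhase3 (input before after : String) (rest : List String) : String :=
    match rest with
    | [] => PySem.Str.replace input before after
    | t :: r =>
      if t = "/\n" then
        (if r = [] then PySem.Str.replace input before after
         else pvAPhase1 (PySem.Str.replace input before after) r)
      else pvAPhase3 input before (after ++ t) r
  termination_by rest.length
end

def execute_replace (input : String) (script : List String) : String :=
  pvAPhase1 input script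

-- ===== PORT B =====
-- B's split pass: fold over the tokens with state (segments, cur); cur is kept as the
-- joined string (Source B joins the accumulated tokens; the value is the same).
def pvBSegs (script : List String) : List String :=
  let p := script.foldl
    (fun (p : List String × String) tok =>
      if tok = "/\n" then (p.1 ++ [p.2], "") else (p.1, p.2 ++ tok))
    ([], "")
  p.1 ++ [p.2]

-- B's `while 3*k+1 < d` rule loop (indexing is always in range; "" is never used)
def pvBLoop (input : String) (segments : List String) (d : Nat) (k : Nat) : String :=
  if 3 * k + 1 < d then
    pvBLoop (PySem.Str.replace input (segments.getD (3 * k + 1) "")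
              (segments.getD (3 * k + 2) "")) segments d (k + 1)
  else input
termination_by d - (3 * k + 1)

def execute_replace_alt (input : String) (script : List String) : String :=
  pvBLoop input (pvBSegs script) ((pvBSegs script).length - 1) 0

-- ===== PRECONDITION & SPEC =====
-- Pre_ excludes scripts that end exactly at the delimiter closing a rule's `before`
-- segment (count of '/\n' ≡ 2 mod 3 and the last token is '/\n'): there A silently
-- drops that final truncated rule while B applies it with an empty replacement;
-- both readings of a truncated script are defensible, so no value is specified there.
def Pre_execute_replace (_input : String) (script : List String) : Prop :=
  ¬ ((script.count "/\n") % 3 = 2 ∧ script.getLast? = some "/\n")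
instance (input : String) (script : List String) : Decidable (Pre_execute_replace input script) := by unfold Pre_execute_replace; infer_instance

def pvWitness_execute_replace : String × List String := ("ab", ["/\n", "a", "/\n", "b", "/\n"])

def Spec_execute_replace (input : String) (script : List String) (out : String) : Prop := out = execute_replace_alt input script
instance (input : String) (script : List String) (out : String) : Decidable (Spec_execute_replace input script out) := by unfold Spec_execute_replace; infer_instance

-- ===== CLAIM (what is proved, stated in full; the proofs are below) =====
def Claim_equal_execute_replace : Prop := ∀ (input : String) (script : List String), Dom_execute_replace input script → Pre_execute_replace input script → Spec_execute_replace input script (execute_replace input script)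

-- ===== LEMMAS AND PROOFS =====

-- proof-side view of the split: token segments (lists of tokens, not yet joined)
def pvSplit (script : List String) : List (List String) :=
  match script with
  | [] => [[]]
  | t :: r =>
    if t = "/\n" then [] :: pvSplit r
    else
      match pvSplit r with
      | s :: ss => (t :: s) :: ss
      | [] => [[t]]   -- unreachable

def pvJoin (l : List String) : String :=
  match l with
  | [] => ""
  | t :: r => t ++ pvJoin r

-- A's behaviour on the split view (guarded triple recursion; the guard is the
-- truncated-rule case that Pre_ excludes)
def pvARules (input : String) (segs : List (List String)) : String :=
  match segs with
  | _ :: before :: after :: rest =>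
    if rest = [] ∧ after = [] then input
    else pvARules (PySem.Str.replace input (pvJoin before) (pvJoin after)) rest
  | _ => input

-- B's behaviour on the split view (unguarded triple recursion)
def pvBRules (input : String) (segs : List String) : String :=
  match segs with
  | _ :: b :: a :: rest => pvBRules (PySem.Str.replace input b a) rest
  | _ => input

theorem pvSplit_ne_nil (r : List String) : pvSplit r ≠ [] := by
  induction r with
  | nil => simp [pvSplit]
  | cons t r ih =>
    simp only [pvSplit]
    split
    · simp
    · cases h : pvSplit r with
      | nil => simp
      | cons s ss => simp

theorem pvSplit_singleton_nil (r : List String) : pvSplit r = [[]] ↔ r = [] := by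
  constructor
  · intro h
    cases r with
    | nil => rfl
    | cons t r =>
      exfalso
      simp only [pvSplit] at h
      split at h
      · simp at h; exact (pvSplit_ne_nil r) h
      · cases hr : pvSplit r with
        | nil => rw [hr] at h; simp at h
        | cons s ss => rw [hr] at h; simp at h
  · intro h; subst h; rfl

theorem pvARules_head_irrel (input : String) (x y : List String) (ss : List (List String)) :
    pvARules input (x :: ss) = pvARules input (y :: ss) := by
  cases ss with
  | nil => rfl
  | cons a ss' =>
    cases ss' with
    | nil => rfl
    | cons b ss'' => simp [pvARules]

-- the joint loop invariant: each of A's phases equals the guarded rule loop on the split suffix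
theorem pv_phases_eq (n : ℕ) : ∀ (rest : List String), rest.length ≤ n →
    (∀ input, pvAPhase1 input rest = pvARules input (pvSplit rest)) ∧
    (∀ input b, pvAPhase2 input b rest =
      (match pvSplit rest with
       | s :: after :: rest' =>
         if after = [] ∧ rest' = [] then input
         else pvARules (PySem.Str.replace input (b ++ pvJoin s) (pvJoin after)) rest'
       | _ => input)) ∧
    (∀ input bef a, pvAPhase3 input bef a rest =
      (match pvSplit rest with
       | s :: ss => pvARules (PySem.Str.replace input bef (a ++ pvJoin s)) ss
       | [] => input)) := by
  induction n with
  | zero =>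
    intro rest hlen
    have h0 : rest = [] := List.length_eq_zero_iff.mp (Nat.le_zero.mp hlen)
    subst h0
    refine ⟨fun input => by simp [pvAPhase1, pvSplit, pvARules], fun input b => ?_, fun input bef a => ?_⟩
    · simp [pvAPhase2, pvSplit]
    · simp [pvAPhase3, pvSplit, pvARules, pvJoin]
  | succ n ih =>
    intro rest hlen
    cases rest with
    | nil =>
      refine ⟨fun input => by simp [pvAPhase1, pvSplit, pvARules], fun input b => ?_, fun input bef a => ?_⟩
      · simp [pvAPhase2, pvSplit]
      · simp [pvAPhase3, pvSplit, pvARules, pvJoin]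
    | cons t r =>
      have hr : r.length ≤ n := by simpa using Nat.lt_succ_iff.mp (by simpa using hlen)
      obtain ⟨ih1, ih2, ih3⟩ := ih r hr
      refine ⟨?_, ?_, ?_⟩
      · -- phase1
        intro input
        by_cases ht : t = "/\n"
        · subst ht
          simp only [pvAPhase1, pvSplit, reduceIte]
          rw [ih2 input ""]
          cases hs : pvSplit r with
          | nil => exact absurd hs (pvSplit_ne_nil r)
          | cons s ss =>
            cases ss with
            | nil => simp [pvARules]
            | cons after rest' =>
              by_cases hA : after = [] ∧ rest' = []
              · obtain ⟨h1, h2⟩ := hA; subst h1; subst h2; simp [pvARules]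
              · have hA' : ¬ (rest' = [] ∧ after = []) := fun h => hA ⟨h.2, h.1⟩
                simp [pvARules, hA, hA']
        · simp only [pvAPhase1, pvSplit, ht, reduceIte]
          rw [ih1 input]
          cases hs : pvSplit r with
          | nil => exact absurd hs (pvSplit_ne_nil r)
          | cons s ss => exact pvARules_head_irrel input s (t :: s) ss
      · -- phase2
        intro input b
        by_cases ht : t = "/\n"
        · subst ht
          simp only [pvAPhase2, pvSplit, reduceIte]
          cases hs : pvSplit r with
          | nil => exact absurd hs (pvSplit_ne_nil r)
          | cons after rest' =>
            by_cases hrn : r = []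
            · subst hrn
              simp [pvSplit] at hs
              obtain ⟨h1, h2⟩ := hs
              subst h1; subst h2
              simp
            · rw [if_neg hrn, ih3 input b "", hs]
              have hne : ¬ (after = [] ∧ rest' = []) := by
                intro h
                exact hrn ((pvSplit_singleton_nil r).mp (by rw [hs, h.1, h.2]))
              simp [pvJoin, hne]
        · simp only [pvAPhase2, pvSplit, ht, reduceIte]
          rw [ih2 input (b ++ t)]
          cases hs : pvSplit r with
          | nil => exact absurd hs (pvSplit_ne_nil r)
          | cons s ss =>
            cases ss with
            | nil => rfl
            | cons after rest' =>
              simp only [pvJoin]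
              rw [String.append_assoc]
      · -- phase3
        intro input bef a
        by_cases ht : t = "/\n"
        · subst ht
          simp only [pvAPhase3, pvSplit, reduceIte]
          by_cases hrn : r = []
          · subst hrn
            simp [pvSplit, pvARules, pvJoin]
          · rw [if_neg hrn, ih1 (PySem.Str.replace input bef a)]
            simp [pvJoin]
        · simp only [pvAPhase3, pvSplit, ht, reduceIte]
          rw [ih3 input bef (a ++ t)]
          cases hs : pvSplit r with
          | nil => exact absurd hs (pvSplit_ne_nil r)
          | cons s ss =>
            simp only [pvJoin]
            rw [String.append_assoc]

-- joined recursive view of B's fold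
def pvSplitJ (cur : String) (script : List String) : List String :=
  match script with
  | [] => [cur]
  | t :: r => if t = "/\n" then cur :: pvSplitJ "" r else pvSplitJ (cur ++ t) r

theorem pvBSegs_foldl_inv (script : List String) : ∀ (segs : List String) (cur : String),
    (script.foldl
      (fun (p : List String × String) tok =>
        if tok = "/\n" then (p.1 ++ [p.2], "") else (p.1, p.2 ++ tok))
      (segs, cur)).1 ++
    [(script.foldl
      (fun (p : List String × String) tok =>
        if tok = "/\n" then (p.1 ++ [p.2], "") else (p.1, p.2 ++ tok))
      (segs, cur)).2] = segs ++ pvSplitJ cur script := by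
  induction script with
  | nil => intro segs cur; simp [pvSplitJ]
  | cons t r ih =>
    intro segs cur
    by_cases ht : t = "/\n"
    · subst ht
      simp only [List.foldl_cons, reduceIte, pvSplitJ]
      rw [ih (segs ++ [cur]) ""]
      simp
    · simp only [List.foldl_cons, ht, reduceIte, pvSplitJ]
      rw [ih segs (cur ++ t)]

theorem pvSplitJ_eq_map (script : List String) : ∀ cur,
    pvSplitJ cur script =
      (match (pvSplit script).map pvJoin with
       | h :: t => (cur ++ h) :: t
       | [] => [cur]) := by
  induction script with
  | nil => intro cur; simp [pvSplitJ, pvSplit, pvJoin]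
  | cons t r ih =>
    intro cur
    by_cases ht : t = "/\n"
    · subst ht
      simp only [pvSplitJ, pvSplit, reduceIte, List.map_cons]
      rw [ih ""]
      cases hs : pvSplit r with
      | nil => exact absurd hs (pvSplit_ne_nil r)
      | cons s ss => simp [pvJoin]
    · simp only [pvSplitJ, pvSplit, ht, reduceIte]
      rw [ih (cur ++ t)]
      cases hs : pvSplit r with
      | nil => exact absurd hs (pvSplit_ne_nil r)
      | cons s ss => simp [pvJoin, String.append_assoc]

theorem pvBSegs_eq_map (script : List String) :
    pvBSegs script = (pvSplit script).map pvJoin := by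
  unfold pvBSegs
  have h := pvBSegs_foldl_inv script [] ""
  simp only [List.nil_append] at h
  rw [h, pvSplitJ_eq_map]
  cases hs : pvSplit script with
  | nil => exact absurd hs (pvSplit_ne_nil script)
  | cons s ss => simp

-- B's indexed loop equals the unguarded triple recursion on the dropped suffix
theorem pvBLoop_eq_rules (n : ℕ) : ∀ (segments : List String) (k : Nat) (input : String),
    segments.length - 3 * k ≤ n → segments ≠ [] →
    pvBLoop input segments (segments.length - 1) k = pvBRules input (segments.drop (3 * k)) := by
  induction n with
  | zero =>
    intro segments k input hlen hne
    have hdrop : segments.drop (3 * k) = [] := by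
      apply List.drop_eq_nil_of_le; omega
    rw [pvBLoop, hdrop]
    have : ¬ 3 * k + 1 < segments.length - 1 := by
      have := Nat.le_zero.mp hlen; omega
    simp [this, pvBRules]
  | succ n ih =>
    intro segments k input hlen hne
    rw [pvBLoop]
    by_cases hg : 3 * k + 1 < segments.length - 1
    · -- at least three elements remain from index 3k
      have hlen3 : 3 * k + 3 ≤ segments.length := by omega
      cases hd : segments.drop (3 * k) with
      | nil => exfalso; have := List.length_drop (l := segments) (i := 3 * k); rw [hd] at this; simp at this; omega
      | cons s0 t0 =>
        cases hd1 : t0 with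
        | nil =>
          exfalso
          have := List.length_drop (l := segments) (i := 3 * k)
          rw [hd, hd1] at this; simp at this; omega
        | cons s1 t1 =>
          cases hd2 : t1 with
          | nil =>
            exfalso
            have := List.length_drop (l := segments) (i := 3 * k)
            rw [hd, hd1, hd2] at this; simp at this; omega
          | cons s2 t2 =>
            subst hd1; subst hd2
            have hg1 : segments.getD (3 * k + 1) "" = s1 := by
              have h1 : segments[3 * k + 1]? = some s1 := by
                have h := congrArg (fun l => l[1]?) hd
                simpa [List.getElem?_drop] using h
              simp [List.getD, h1]
            have hg2 : segments.getD (3 * k + 2) "" = s2 := by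
              have h2 : segments[3 * k + 2]? = some s2 := by
                have h := congrArg (fun l => l[2]?) hd
                simpa [List.getElem?_drop] using h
              simp [List.getD, h2]
            have hdropsucc : segments.drop (3 * (k + 1)) = t2 := by
              have h := congrArg (List.drop 3) hd
              rw [List.drop_drop] at h
              have h3 : 3 * (k + 1) = 3 * k + 3 := by ring
              rw [h3]
              simpa using h
            rw [if_pos hg, hg1, hg2,
              ih segments (k + 1) (PySem.Str.replace input s1 s2) (by omega) hne,
              hdropsucc]
            simp only [pvBRules]
    · rw [if_neg hg]
      have hle : segments.length ≤ 3 * k + 2 := by omega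
      cases hd : segments.drop (3 * k) with
      | nil => rfl
      | cons s0 t0 =>
        cases hd1 : t0 with
        | nil => rfl
        | cons s1 t1 =>
          cases hd2 : t1 with
          | nil => rfl
          | cons s2 t2 =>
            exfalso
            have := List.length_drop (l := segments) (i := 3 * k)
            rw [hd, hd1, hd2] at this; simp at this; omega

-- length and last-element facts about the split
theorem pvSplit_length (script : List String) :
    (pvSplit script).length = script.count "/\n" + 1 := by
  induction script with
  | nil => simp [pvSplit]
  | cons t r ih =>
    by_cases ht : t = "/\n"
    · subst ht; simp [pvSplit, ih]
    · simp only [pvSplit, ht, reduceIte]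
      cases hs : pvSplit r with
      | nil => exact absurd hs (pvSplit_ne_nil r)
      | cons s ss =>
        rw [hs] at ih
        simp only [List.length_cons] at ih ⊢
        simp [ht, ih]

theorem pvGetLast_cons {α : Type} (x : α) (l : List α) (h : l ≠ []) :
    (x :: l).getLast? = l.getLast? := by
  cases l with
  | nil => exact absurd rfl h
  | cons a b => exact List.getLast?_cons_cons

theorem pvSplit_getLast (script : List String) :
    (pvSplit script).getLast? = some [] ↔ (script = [] ∨ script.getLast? = some "/\n") := by
  induction script with
  | nil => simp [pvSplit]
  | cons t r ih =>
    cases r with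
    | nil =>
      by_cases ht : t = "/\n"
      · subst ht; simp [pvSplit]
      · simp [pvSplit, ht]
    | cons a b =>
      have hlast : (t :: a :: b).getLast? = (a :: b).getLast? := List.getLast?_cons_cons
      by_cases ht : t = "/\n"
      · subst ht
        have hsp : pvSplit ("/\n" :: a :: b) = [] :: pvSplit (a :: b) := by
          rw [pvSplit]; simp
        rw [hsp, pvGetLast_cons _ _ (pvSplit_ne_nil (a :: b)), ih, hlast]
        simp
      · cases hs : pvSplit (a :: b) with
        | nil => exact absurd hs (pvSplit_ne_nil _)
        | cons s ss =>
          have hsp : pvSplit (t :: a :: b) = (t :: s) :: ss := by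
            rw [pvSplit]; simp [ht, hs]
          rw [hsp]
          rw [hs] at ih
          cases hss : ss with
          | nil =>
            subst hss
            -- one segment: a :: b contains no delimiter, so it cannot end with one
            have hcount : (a :: b).count "/\n" = 0 := by
              have := pvSplit_length (a :: b)
              rw [hs] at this
              simpa using this.symm
            have hnl : (a :: b).getLast? ≠ some "/\n" := by
              intro h
              have hmem : "/\n" ∈ a :: b := by
                have := List.mem_of_mem_getLast? (l := a :: b) (a := "/\n")
                exact this (by rw [h]; rfl)
              rw [List.count_eq_zero] at hcount
              exact hcount hmem
            simp [hlast, hnl]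
          | cons s1 ss1 =>
            subst hss
            rw [List.getLast?_cons_cons, ← List.getLast?_cons_cons (a := s), ih, hlast]
            simp

-- under Pre_, the guard in pvARules never fires, so the guarded and unguarded loops agree
theorem pvARules_eq_pvBRules (n : ℕ) : ∀ (segs : List (List String)) (input : String),
    segs.length ≤ n →
    ¬ (segs.length % 3 = 0 ∧ segs.getLast? = some []) →
    pvARules input segs = pvBRules input (segs.map pvJoin) := by
  induction n with
  | zero =>
    intro segs input hlen _
    have : segs = [] := List.length_eq_zero_iff.mp (Nat.le_zero.mp hlen)
    subst this; rfl
  | succ n ih =>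
    intro segs input hlen hpre
    match segs with
    | [] => rfl
    | [x] => rfl
    | [x, y] => rfl
    | x :: y :: z :: rest =>
      simp only [pvARules, List.map_cons, pvBRules]
      by_cases hg : rest = [] ∧ z = []
      · exfalso
        apply hpre
        rw [hg.1, hg.2]
        simp
      · rw [if_neg hg]
        apply ih
        · simp at hlen; omega
        · intro ⟨h1, h2⟩
          apply hpre
          constructor
          · simp [Nat.add_mod, h1]
          · cases hrest : rest with
            | nil => simp [hrest] at h2
            | cons a b =>
              subst hrest
              rw [List.getLast?_cons_cons, List.getLast?_cons_cons, List.getLast?_cons_cons]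
              exact h2

-- ===== VERDICT (by name: the statement is the Claim_ definition above) =====
theorem execute_replace_spec : Claim_equal_execute_replace := by
  intro input script _ hpre
  unfold Spec_execute_replace execute_replace execute_replace_alt
  rw [(pv_phases_eq script.length script le_rfl).1 input]
  rw [pvBSegs_eq_map]
  have hne : (pvSplit script).map pvJoin ≠ [] := by
    simp [pvSplit_ne_nil script]
  rw [pvBLoop_eq_rules (((pvSplit script).map pvJoin).length) _ 0 input (by omega) hne]
  simp only [Nat.mul_zero, List.drop_zero]
  apply pvARules_eq_pvBRules (pvSplit script).length _ input le_rfl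
  intro ⟨h1, h2⟩
  apply hpre
  unfold Pre_execute_replace at *
  rw [pvSplit_length] at h1
  have h3 := (pvSplit_getLast script).mp h2
  refine ⟨by omega, ?_⟩
  rcases h3 with h | h
  · exfalso; subst h; simp at h1
  · exact h
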